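-- pv_equiv track=rewrite | github.com/sahithya624/Habit-Tracker | backend/app/ai/service.py | _build_habit_completion_summary
-- ===== SOURCE A (Python) =====
-- from collections import defaultdict
-- from typing import Any
--
-- def _build_habit_completion_summary(habits: list[dict[str, Any]], habit_logs: list[dict[str, Any]]) -> str:
--     if not habits:
--         return "No habits configured this week."
--
--     by_habit: defaultdict[str, int] = defaultdict(int)
--     for log in habit_logs:
--         by_habit[str(log["habit_id"])] += 1
--
--     lines = []
--     for habit in habits:
--         count = by_habit.get(str(habit["id"]), 0)
--         lines.append(f"- {habit['name']}: {count} check-ins")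
--     return "\n".join(lines)
-- ===== SOURCE B (Python) =====
-- def _build_habit_completion_summary(habits: list, habit_logs: list) -> str:
--     if not habits:
--         return "No habits configured this week."
--     return "\n".join(
--         f"- {habit['name']}: {sum(1 for log in habit_logs if str(log['habit_id']) == str(habit['id']))} check-ins"
--         for habit in habits
--     )
-- ===== Notes on version B (the rewrite author's own statement) =====
-- stated objective: simpler
-- what changed: Drops the defaultdict counting pass entirely: B computes each habit's count by a direct generator-sum scan of habit_logs inside a single join-over-habits expression.
import Mathlib
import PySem

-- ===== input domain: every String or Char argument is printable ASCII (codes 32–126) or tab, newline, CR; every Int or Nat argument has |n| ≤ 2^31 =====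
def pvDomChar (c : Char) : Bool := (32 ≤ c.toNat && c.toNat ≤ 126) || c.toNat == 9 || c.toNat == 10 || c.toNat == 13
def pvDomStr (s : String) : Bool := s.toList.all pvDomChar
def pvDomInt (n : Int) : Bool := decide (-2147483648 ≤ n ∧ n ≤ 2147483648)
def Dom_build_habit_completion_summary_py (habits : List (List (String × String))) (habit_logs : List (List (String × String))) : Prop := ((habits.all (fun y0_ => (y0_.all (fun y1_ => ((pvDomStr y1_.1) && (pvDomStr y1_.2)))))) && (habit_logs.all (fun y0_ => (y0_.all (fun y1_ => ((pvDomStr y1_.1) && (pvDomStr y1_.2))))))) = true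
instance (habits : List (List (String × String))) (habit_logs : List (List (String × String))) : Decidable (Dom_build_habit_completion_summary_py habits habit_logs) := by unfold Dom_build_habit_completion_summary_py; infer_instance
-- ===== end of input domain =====

-- B replaces A's defaultdict index with a direct per-habit scan of habit_logs (simpler: no
-- intermediate dictionary); same return value wherever A returns.

-- first-match lookup in an association list (Python dict d[k] / d.get(k)); none = KeyError
def alGet? : List (String × String) → String → Option String
  | [], _ => none
  | (a, b) :: r, k => if a = k then some b else alGet? r k

-- d[k] under the precondition that k is present (Pre_ guarantees isSome)
def keyOf (d : List (String × String)) (k : String) : String := (alGet? d k).getD ""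

-- ===== PORT A =====
def build_habit_completion_summary_py (habits : List (List (String × String))) (habit_logs : List (List (String × String))) : String :=
  if habits = [] then "No habits configured this week."
  else
    let by_habit : PySem.Dict String Int :=
      habit_logs.foldl (fun d log => d.modify (keyOf log "habit_id") 0 (· + 1)) PySem.Dict.empty
    let lines : List String :=
      habits.foldl (fun acc habit =>
        acc ++ ["- " ++ keyOf habit "name" ++ ": " ++
                PySem.Int.toStr (by_habit.getD (keyOf habit "id") 0) ++ " check-ins"]) []
    PySem.Str.join "\n" lines

-- ===== PORT B =====
def build_habit_completion_summary_py_alt (habits : List (List (String × String))) (habit_logs : List (List (String × String))) : String :=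
  if habits = [] then "No habits configured this week."
  else
    PySem.Str.join "\n" (habits.map (fun habit =>
      "- " ++ keyOf habit "name" ++ ": " ++
      PySem.Int.toStr (habit_logs.foldl (fun n log =>
        if keyOf log "habit_id" = keyOf habit "id" then n + 1 else n) (0 : Int)) ++ " check-ins"))

-- ===== PRECONDITION & SPEC =====
-- Pre_ excludes exactly the inputs where the Python raises KeyError: with habits nonempty,
-- every log must carry "habit_id" and every habit must carry "id" and "name".
def Pre_build_habit_completion_summary_py (habits : List (List (String × String))) (habit_logs : List (List (String × String))) : Prop :=
  habits = [] ∨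
    ((∀ log ∈ habit_logs, "habit_id" ∈ log.map Prod.fst) ∧
     (∀ habit ∈ habits, "id" ∈ habit.map Prod.fst ∧ "name" ∈ habit.map Prod.fst))
instance (habits : List (List (String × String))) (habit_logs : List (List (String × String))) : Decidable (Pre_build_habit_completion_summary_py habits habit_logs) := by unfold Pre_build_habit_completion_summary_py; infer_instance
def pvWitness_build_habit_completion_summary_py : (List (List (String × String))) × (List (List (String × String))) :=
  ([[("id", "1"), ("name", "run")]], [[("habit_id", "1")], [("habit_id", "2")]])

def Spec_build_habit_completion_summary_py (habits : List (List (String × String))) (habit_logs : List (List (String × String))) (out : String) : Prop := out = build_habit_completion_summary_py_alt habits habit_logs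
instance (habits : List (List (String × String))) (habit_logs : List (List (String × String))) (out : String) : Decidable (Spec_build_habit_completion_summary_py habits habit_logs out) := by unfold Spec_build_habit_completion_summary_py; infer_instance

-- ===== CLAIM (what is proved, stated in full; the proofs are below) =====
def Claim_equal_build_habit_completion_summary_py : Prop := ∀ (habits : List (List (String × String))) (habit_logs : List (List (String × String))), Dom_build_habit_completion_summary_py habits habit_logs → Pre_build_habit_completion_summary_py habits habit_logs → Spec_build_habit_completion_summary_py habits habit_logs (build_habit_completion_summary_py habits habit_logs)

-- ===== LEMMAS AND PROOFS =====

-- B's counting loop computes the count of the key in the mapped key list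
lemma foldl_if_count (habit_logs : List (List (String × String))) (t : String) (c : Int) :
    habit_logs.foldl (fun n log => if keyOf log "habit_id" = t then n + 1 else n) c
      = c + ((habit_logs.map (fun log => keyOf log "habit_id")).count t : Int) := by
  induction habit_logs generalizing c with
  | nil => simp
  | cons l r ih =>
    simp only [List.foldl_cons, List.map_cons, List.count_cons, ih]
    by_cases h : keyOf l "habit_id" = t
    all_goals simp [h]
    all_goals ring

-- A's defaultdict lookup equals the same count
lemma dict_count (habit_logs : List (List (String × String))) (t : String) :
    (habit_logs.foldl (fun d log => d.modify (keyOf log "habit_id") 0 (· + 1))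
        (PySem.Dict.empty : PySem.Dict String Int)).getD t 0
      = ((habit_logs.map (fun log => keyOf log "habit_id")).count t : Int) := by
  rw [← List.foldl_map (f := fun log => keyOf log "habit_id")
        (g := fun d x => PySem.Dict.modify d x 0 (· + 1))]
  rw [PySem.Dict.getD_foldl_modify_add_one]
  simp

-- ===== VERDICT (by name: the statement is the Claim_ definition above) =====
theorem build_habit_completion_summary_py_spec : Claim_equal_build_habit_completion_summary_py := by
  intro habits habit_logs _ _
  unfold Spec_build_habit_completion_summary_py
  unfold build_habit_completion_summary_py build_habit_completion_summary_py_alt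
  by_cases h : habits = []
  · simp [h]
  · simp only [if_neg h]
    rw [PySem.List.foldl_append_singleton_eq_map]
    simp only [List.nil_append]
    apply congrArg (PySem.Str.join "\n")
    apply List.map_congr_left
    intro habit _
    rw [dict_count, foldl_if_count]
    simp
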